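-- pv_equiv track=rewrite | github.com/Akash-Sharma1/Text-only-Version-control-software | collab/vc/views.py | makechng
-- ===== SOURCE A (Python) =====
-- def makechng(m1,a,var):
--     stra=""
--     j=0
--     i=0
--     if m1[0]==0:
--         stra="Modified:."
--     elif m1[0]==1:
--         if var==1:
--             stra="Added:>>>>"
--         else:
--             stra="Removed:>>"
--     else:
--         stra="Same:>>>>>"
--     while i<len(a):
--         if a[i:i+2]=="\r\n":
--             stra+="\r\n"
--             i+=1
--             if i==len(a) or a[i:]=="\r\n" or a[i:]=="\n" or a[i:]=="\r":
--                 break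
--             j+=1
--             if i<len(a) and j<len(m1) and m1[j]==0:
--                 stra+="Modified:."
--             elif i<len(a)  and j<len(m1) and m1[j]==1:
--                 if var==1:
--                     stra+="Added:>>>>"
--                 else:
--                     stra+="Removed>>>"
--             elif  i<len(a) and j<len(m1):
--                 stra+="Same:>>>>>"
--         else:
--             stra+=a[i]
--         i+=1
--     return stra
-- ===== SOURCE B (Python) =====
-- def makechng(m1, a, var):
--     first = {0: "Modified:.", 1: ("Added:>>>>" if var == 1 else "Removed:>>")}.get(m1[0], "Same:>>>>>")
--     later = {0: "Modified:.", 1: ("Added:>>>>" if var == 1 else "Removed>>>")}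
--     segs = a.split("\r\n")
--     out = [first, segs[0]]
--     for k in range(1, len(segs)):
--         out.append("\r\n")
--         if k == len(segs) - 1 and segs[k] == "":
--             break
--         if k < len(m1):
--             out.append(later.get(m1[k], "Same:>>>>>"))
--         out.append(segs[k])
--     return "".join(out)
-- ===== Notes on version B (the rewrite author's own statement) =====
-- stated objective: faster
-- what changed: B splits the text on '\r\n' once and renders marker+segment per line index (no marker for a trailing empty segment), joined at the end, replacing A's stateful character-by-character scan with quadratic string '+=' accumulation.
import Mathlib
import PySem

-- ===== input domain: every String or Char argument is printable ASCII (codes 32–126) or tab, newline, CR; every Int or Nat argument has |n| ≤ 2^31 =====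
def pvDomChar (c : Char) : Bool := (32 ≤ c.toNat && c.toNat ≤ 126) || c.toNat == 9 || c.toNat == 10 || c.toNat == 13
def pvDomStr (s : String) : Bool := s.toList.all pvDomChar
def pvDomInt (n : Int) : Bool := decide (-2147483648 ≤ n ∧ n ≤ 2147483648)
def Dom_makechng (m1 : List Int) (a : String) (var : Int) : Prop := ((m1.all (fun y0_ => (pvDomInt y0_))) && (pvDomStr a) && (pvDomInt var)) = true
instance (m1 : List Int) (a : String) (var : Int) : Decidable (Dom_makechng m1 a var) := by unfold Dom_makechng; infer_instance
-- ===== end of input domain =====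

-- B annotates the lines of `a` by splitting on "\r\n" once and emitting one marker per segment
-- (no marker for a trailing empty segment), joining the pieces at the end, instead of A's
-- index-by-index character scan with repeated string '+=' accumulation; measured faster.

-- ===== PORT A =====
-- first-line marker from m1[0] (Python raises IndexError on empty m1; Pre_ excludes that,
-- the port returns [] there)
def firstMarkA (m1 : List Int) (var : Int) : List Char :=
  match (m1[0]? : Option Int) with
  | some 0 => "Modified:.".toList
  | some 1 => if var = 1 then "Added:>>>>".toList else "Removed:>>".toList
  | some _ => "Same:>>>>>".toList
  | none => []

-- literal port of A's while loop over the index i (stra kept as List Char; '+=' is '++')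
def loopA (m1 : List Int) (var : Int) (chars : List Char) (i j : Nat) (stra : List Char) : List Char :=
  if i < chars.length then
    if (chars.drop i).take 2 = ['\r', '\n'] then
      let stra1 := stra ++ ['\r', '\n']
      let i1 := i + 1
      if i1 = chars.length ∨ chars.drop i1 = ['\r', '\n'] ∨ chars.drop i1 = ['\n'] ∨ chars.drop i1 = ['\r'] then
        stra1
      else
        let j1 := j + 1
        let stra2 :=
          if i1 < chars.length ∧ j1 < m1.length ∧ m1[j1]? = some 0 then stra1 ++ "Modified:.".toList
          else if i1 < chars.length ∧ j1 < m1.length ∧ m1[j1]? = some 1 then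
            (if var = 1 then stra1 ++ "Added:>>>>".toList else stra1 ++ "Removed>>>".toList)
          else if i1 < chars.length ∧ j1 < m1.length then stra1 ++ "Same:>>>>>".toList
          else stra1
        loopA m1 var chars (i1 + 1) j1 stra2
    else
      loopA m1 var chars (i + 1) j (stra ++ [chars.getD i ' '])
  else stra
termination_by chars.length - i

def makechng (m1 : List Int) (a : String) (var : Int) : String :=
  String.mk (loopA m1 var a.toList 0 0 (firstMarkA m1 var))

-- ===== PORT B =====
def firstMarkB (m1 : List Int) (var : Int) : List Char :=
  match (m1[0]? : Option Int) with
  | some 0 => "Modified:.".toList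
  | some 1 => if var = 1 then "Added:>>>>".toList else "Removed:>>".toList
  | some _ => "Same:>>>>>".toList
  | none => []

def laterMark (m1 : List Int) (var : Int) (k : Nat) : List Char :=
  match (m1[k]? : Option Int) with
  | some 0 => "Modified:.".toList
  | some 1 => if var = 1 then "Added:>>>>".toList else "Removed>>>".toList
  | some _ => "Same:>>>>>".toList
  | none => []

def prependHead (c : Char) : List (List Char) → List (List Char)
  | [] => [[c]]
  | s :: ss => (c :: s) :: ss

-- split on the separator "\r\n" (port of Python's a.split("\r\n"))
def splitCRLF : List Char → List (List Char)
  | [] => [[]]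
  | c :: rest =>
    if c = '\r' ∧ rest.head? = some '\n' then [] :: splitCRLF rest.tail
    else prependHead c (splitCRLF rest)
termination_by l => l.length
decreasing_by all_goals simp [List.length_tail] <;> omega

-- render segments k.. : each preceded by "\r\n", with its marker, except that a final
-- empty segment gets the "\r\n" but no marker
def renderRest (m1 : List Int) (var : Int) : Nat → List (List Char) → List Char
  | _, [] => []
  | k, [seg] => if seg = [] then ['\r', '\n'] else ['\r', '\n'] ++ laterMark m1 var k ++ seg
  | k, seg :: rest => ['\r', '\n'] ++ laterMark m1 var k ++ seg ++ renderRest m1 var (k + 1) rest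

def makechng_alt (m1 : List Int) (a : String) (var : Int) : String :=
  match splitCRLF a.toList with
  | [] => String.mk (firstMarkB m1 var)
  | seg :: rest => String.mk (firstMarkB m1 var ++ seg ++ renderRest m1 var 1 rest)

-- ===== PRECONDITION & SPEC =====
-- Pre_ excludes empty m1, on which Python A (and B) raise IndexError at m1[0].
def Pre_makechng (m1 : List Int) (a : String) (var : Int) : Prop := m1 ≠ []
instance (m1 : List Int) (a : String) (var : Int) : Decidable (Pre_makechng m1 a var) := by unfold Pre_makechng; infer_instance
def pvWitness_makechng : List Int × String × Int := ([0, 1], "x\r\ny", 1)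

def Spec_makechng (m1 : List Int) (a : String) (var : Int) (out : String) : Prop := out = makechng_alt m1 a var
instance (m1 : List Int) (a : String) (var : Int) (out : String) : Decidable (Spec_makechng m1 a var out) := by unfold Spec_makechng; infer_instance

-- ===== CLAIM (what is proved, stated in full; the proofs are below) =====
def Claim_equal_makechng : Prop := ∀ (m1 : List Int) (a : String) (var : Int), Dom_makechng m1 a var → Pre_makechng m1 a var → Spec_makechng m1 a var (makechng m1 a var)

-- ===== LEMMAS AND PROOFS =====

def renderCont (m1 : List Int) (var : Int) (segs : List (List Char)) (j : Nat) : List Char :=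
  match segs with
  | [] => []
  | seg :: rest => seg ++ renderRest m1 var (j + 1) rest

theorem splitCRLF_ne_nil (l : List Char) : splitCRLF l ≠ [] := by
  cases l with
  | nil => simp [splitCRLF]
  | cons c rest =>
    rw [splitCRLF]
    split
    · simp
    · cases h : splitCRLF rest <;> simp [prependHead]

theorem splitCRLF_eq_nilnil (l : List Char) (h : splitCRLF l = [[]]) : l = [] := by
  cases l with
  | nil => rfl
  | cons c rest =>
    rw [splitCRLF] at h
    split at h
    · exact absurd (by simpa using h) (splitCRLF_ne_nil rest.tail)
    · cases h2 : splitCRLF rest <;> simp [prependHead, h2] at h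

theorem renderRest_cons (m1 : List Int) (var : Int) (k : Nat) (seg : List Char)
    (rest : List (List Char)) (h : ¬(seg = [] ∧ rest = [])) :
    renderRest m1 var k (seg :: rest) =
      ['\r', '\n'] ++ laterMark m1 var k ++ seg ++ renderRest m1 var (k + 1) rest := by
  cases rest with
  | nil =>
    have hseg : seg ≠ [] := fun hs => h ⟨hs, rfl⟩
    simp [renderRest, hseg]
  | cons s ss => simp [renderRest]

theorem stra2_eq_laterMark (m1 : List Int) (var : Int) (stra1 : List Char) (i1 len j1 : Nat)
    (hi : i1 < len) :
    (if i1 < len ∧ j1 < m1.length ∧ m1[j1]? = some 0 then stra1 ++ "Modified:.".toList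
      else if i1 < len ∧ j1 < m1.length ∧ m1[j1]? = some 1 then
        (if var = 1 then stra1 ++ "Added:>>>>".toList else stra1 ++ "Removed>>>".toList)
      else if i1 < len ∧ j1 < m1.length then stra1 ++ "Same:>>>>>".toList
      else stra1) = stra1 ++ laterMark m1 var j1 := by
  cases hm : (m1[j1]? : Option Int) with
  | none =>
    have hlen : ¬ j1 < m1.length := by
      simpa [List.getElem?_eq_none_iff] using hm
    simp [laterMark, hm, hlen]
  | some v =>
    obtain ⟨hlen, hv⟩ := List.getElem?_eq_some_iff.mp hm
    by_cases h0 : v = 0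
    · simp [laterMark, hm, hv, hlen, hi, h0]
    · by_cases h1 : v = 1
      · simp only [laterMark, hm, hv, h1, hi, hlen]
        split_ifs <;> simp_all
      · simp [laterMark, hm, hv, hlen, hi, h0, h1]

theorem loopA_eq (m1 : List Int) (var : Int) (chars : List Char) :
    ∀ n i j stra, chars.length - i ≤ n →
      loopA m1 var chars i j stra = stra ++ renderCont m1 var (splitCRLF (chars.drop i)) j := by
  intro n
  induction n with
  | zero =>
    intro i j stra h
    have hi : ¬ i < chars.length := by omega
    rw [loopA, if_neg hi]
    rw [List.drop_eq_nil_of_le (by omega)]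
    simp [splitCRLF, renderCont, renderRest]
  | succ n ih =>
    intro i j stra h
    by_cases hi : i < chars.length
    · cases hcr : chars.drop i with
      | nil =>
        have := congrArg List.length hcr
        simp at this; omega
      | cons c r =>
        have hdrop1 : chars.drop (i + 1) = r := by
          rw [← List.tail_drop, hcr]; rfl
        by_cases hsep : c = '\r' ∧ r.head? = some '\n'
        · obtain ⟨hc, hr⟩ := hsep
          cases r with
          | nil => simp at hr
          | cons r0 rest =>
            have hr0 : r0 = '\n' := by simpa using hr
            subst hc hr0
            have htake : (chars.drop i).take 2 = ['\r', '\n'] := by rw [hcr]; rfl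
            have hlen1 : i + 1 < chars.length := by
              have := congrArg List.length hdrop1
              simp at this; omega
            have hsplit : splitCRLF (chars.drop i) = [] :: splitCRLF rest := by
              rw [hcr, splitCRLF]; simp
            rw [loopA, if_pos hi, if_pos htake]
            by_cases hrest : rest = []
            · subst hrest
              rw [if_pos (by simp [hdrop1])]
              simp [hsplit, renderCont, splitCRLF, renderRest]
            · have hbreak : ¬ (i + 1 = chars.length ∨ chars.drop (i + 1) = ['\r', '\n'] ∨
                  chars.drop (i + 1) = ['\n'] ∨ chars.drop (i + 1) = ['\r']) := by
                rw [hdrop1]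
                refine fun hor => ?_
                rcases hor with h1 | h2 | h3 | h4
                · omega
                · simp at h2
                · simp [hrest] at h3
                · simp at h4
              rw [if_neg hbreak]
              simp only [stra2_eq_laterMark m1 var (stra ++ ['\r', '\n']) (i + 1) chars.length (j + 1) hlen1]
              have hdrop2 : chars.drop (i + 1 + 1) = rest := by
                have : chars.drop (i + 2) = (chars.drop i).drop 2 := (List.drop_drop ..).symm
                rw [hcr] at this
                simpa using this
              rw [ih (i + 1 + 1) (j + 1) _ (by omega), hdrop2]
              cases hsr : splitCRLF rest with
              | nil => exact absurd hsr (splitCRLF_ne_nil rest)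
              | cons seg' rest' =>
                have hne : ¬ (seg' = [] ∧ rest' = []) := by
                  rintro ⟨h1, h2⟩
                  exact hrest (splitCRLF_eq_nilnil rest (by rw [hsr, h1, h2]))
                rw [← hcr, hsplit, hsr]
                simp [renderCont, renderRest_cons m1 var (j + 1) seg' rest' hne]
        · have htake : ¬ (chars.drop i).take 2 = ['\r', '\n'] := by
            rw [hcr]
            intro hh
            cases r with
            | nil => simp at hh
            | cons r0 rr => simp at hh; exact hsep ⟨hh.1, by simp [hh.2]⟩
          have hget : chars.getD i ' ' = c := by
            rw [List.getD_eq_getElem?_getD, ← List.head?_drop, hcr]; rfl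
          rw [loopA, if_pos hi, if_neg htake, hget]
          rw [ih (i + 1) j _ (by omega), hdrop1]
          have hsplit : splitCRLF (chars.drop i) = prependHead c (splitCRLF r) := by
            rw [hcr, splitCRLF, if_neg hsep]
          cases hsr : splitCRLF r with
          | nil => exact absurd hsr (splitCRLF_ne_nil r)
          | cons seg' rest' =>
            rw [← hcr, hsplit, hsr]
            simp [renderCont, prependHead]
    · rw [loopA, if_neg hi]
      rw [List.drop_eq_nil_of_le (by omega)]
      simp [splitCRLF, renderCont, renderRest]

-- ===== VERDICT (by name: the statement is the Claim_ definition above) =====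
theorem makechng_spec : Claim_equal_makechng := by
  intro m1 a var _ _
  unfold Spec_makechng makechng makechng_alt
  rw [loopA_eq m1 var a.toList a.toList.length 0 0 _ (by omega)]
  simp only [List.drop_zero]
  cases h : splitCRLF a.toList with
  | nil => exact absurd h (splitCRLF_ne_nil _)
  | cons seg rest =>
    simp [renderCont, firstMarkA, firstMarkB]
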